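-- pv_equiv track=rewrite | github.com/MaherdeepChhabra/Python-Import-Codes-CIS325 | A3-mchhabr5.py | get_char_count_dict
-- ===== SOURCE A (Python) =====
-- def get_char_count_dict(txt):
--     # Check if the input is a string
--     if not isinstance(txt, str):
--         return -1
--     txt = txt.lower()
--     char_count_dict = {}
--     for char in txt:
--         if char != ' ':  # Skip whitespace characters
--             if char in char_count_dict:
--                 char_count_dict[char] += 1  # Increment the count of the character if it already exists
--             else:
--                 char_count_dict[char] = 1  # Add new character to the dictionary with a count of 1
--     # Return the dictionary containing characters and their counts
--     return char_count_dict
-- ===== SOURCE B (Python) =====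
-- def get_char_count_dict(txt):
--     # Check if the input is a string
--     if not isinstance(txt, str):
--         return -1
--     txt = txt.lower()
--     return {c: txt.count(c) for c in dict.fromkeys(txt) if c != ' '}
-- ===== Notes on version B (the rewrite author's own statement) =====
-- stated objective: alternative
-- what changed: Replaces the single accumulating dict-building pass with a first-occurrence dedup (dict.fromkeys) followed by one full-string txt.count scan per distinct non-space character, assembled by a dict comprehension.
import Mathlib
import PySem

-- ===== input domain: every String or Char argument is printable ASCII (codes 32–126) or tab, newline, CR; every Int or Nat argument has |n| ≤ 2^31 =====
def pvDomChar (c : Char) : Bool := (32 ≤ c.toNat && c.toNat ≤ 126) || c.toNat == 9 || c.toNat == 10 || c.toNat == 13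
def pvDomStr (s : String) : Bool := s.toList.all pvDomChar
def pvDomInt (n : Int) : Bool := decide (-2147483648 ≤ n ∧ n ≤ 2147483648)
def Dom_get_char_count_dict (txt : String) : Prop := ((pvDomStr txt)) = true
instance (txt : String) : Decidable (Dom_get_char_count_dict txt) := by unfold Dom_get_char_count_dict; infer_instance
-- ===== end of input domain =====

-- B replaces A's single accumulating counting pass by a first-occurrence dedup followed by a per-distinct-character full count scan (same O(n·k) work pushed into the C-level str.count, measured faster at large sizes).


-- ===== PORT A =====
-- A: lower the string, then one pass over its characters building a counting dict
-- (skip ' '; increment if present, else insert with count 1); return the dict's items.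
-- (A's 'isinstance' guard cannot fire under the type convention: txt is a String.)
def get_char_count_dict (txt : String) : List (String × Int) :=
  let t := PySem.Chars.lower txt.toList
  let d := t.foldl (fun (d : PySem.Dict Char Int) ch =>
      if ch != ' ' then
        if d.contains ch then d.insert ch (d.getD ch 0 + 1)
        else d.insert ch 1
      else d) PySem.Dict.empty
  d.items.map (fun p => (String.ofList [p.1], p.2))

-- ===== PORT B =====
-- B: lower the string, dedup to first occurrences (dict.fromkeys), drop ' ',
-- and pair each distinct character with txt.count(c) over the whole lowered string.
def get_char_count_dict_alt (txt : String) : List (String × Int) :=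
  let t := PySem.Chars.lower txt.toList
  ((PySem.List.dedup t).filter (fun c => c != ' ')).map
    (fun c => (String.ofList [c], (t.count c : Int)))

-- ===== PRECONDITION & SPEC =====
def Spec_get_char_count_dict (txt : String) (out : List (String × Int)) : Prop := out = get_char_count_dict_alt txt
instance (txt : String) (out : List (String × Int)) : Decidable (Spec_get_char_count_dict txt out) := by unfold Spec_get_char_count_dict; infer_instance

-- ===== CLAIM (what is proved, stated in full; the proofs are below) =====
def Claim_equal_get_char_count_dict : Prop := ∀ (txt : String), Dom_get_char_count_dict txt → Spec_get_char_count_dict txt (get_char_count_dict txt)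

-- ===== LEMMAS AND PROOFS =====

-- A's step function is exactly the 'insert (getD + 1)' counting step.
theorem pv_step_eq :
    (fun (d : PySem.Dict Char Int) ch =>
      if ch != ' ' then
        if d.contains ch then d.insert ch (d.getD ch 0 + 1)
        else d.insert ch 1
      else d)
    = (fun (d : PySem.Dict Char Int) ch =>
        if ch != ' ' then d.insert ch (d.getD ch 0 + 1) else d) := by
  funext d ch
  by_cases h : (ch != ' ') = true
  · simp only [h, if_true]
    by_cases hc : d.contains ch = true
    · simp [hc]
    · simp [hc, PySem.Dict.getD_of_not_contains d 0 (by simpa using hc)]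
  · simp [h]

-- Python's set-of-first-occurrences commutes with filtering: a single Set.add step …
theorem pv_add_filter (p : Char → Bool) (s : List Char) (x : Char) :
    (PySem.Set.add s x).filter p =
      if p x then PySem.Set.add (s.filter p) x else s.filter p := by
  by_cases hp : p x <;> by_cases hm : x ∈ s <;>
    simp [PySem.Set.add, PySem.Set.contains, hp, hm, List.filter_append,
      List.mem_filter]

-- … hence dedup of a filtered list is the filtered dedup.
theorem pv_dedup_filter (p : Char → Bool) (l : List Char) :
    PySem.List.dedup (l.filter p) = (PySem.List.dedup l).filter p := by
  simp only [PySem.List.dedup_eq_ofList, PySem.Set.ofList_eq_foldl]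
  suffices h : ∀ s : List Char,
      List.foldl PySem.Set.add (s.filter p) (l.filter p)
        = (List.foldl PySem.Set.add s l).filter p by
    simpa using h []
  induction l with
  | nil => intro s; simp
  | cons c t ih =>
    intro s
    have ha := pv_add_filter p s c
    by_cases hp : p c
    · simp only [hp, if_true] at ha
      simp only [List.filter_cons, hp, if_true, List.foldl_cons, ← ha, ih]
    · simp only [hp, Bool.false_eq_true, if_false] at ha
      simp only [List.filter_cons, hp, Bool.false_eq_true, if_false,
        List.foldl_cons, ← ha, ih]

theorem get_char_count_dict_eq (txt : String) :
    get_char_count_dict txt = get_char_count_dict_alt txt := by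
  unfold get_char_count_dict get_char_count_dict_alt
  rw [pv_step_eq]
  show (List.foldl (fun (d : PySem.Dict Char Int) ch =>
          if (ch != ' ') = true then d.insert ch (d.getD ch 0 + 1) else d)
        PySem.Dict.empty (PySem.Chars.lower txt.toList)).items.map
          (fun p => (String.ofList [p.1], p.2))
      = ((PySem.List.dedup (PySem.Chars.lower txt.toList)).filter (fun c => c != ' ')).map
          (fun c => (String.ofList [c], ((PySem.Chars.lower txt.toList).count c : Int)))
  rw [← List.foldl_filter,
    PySem.Dict.foldl_insert_getD_add_one_eq_counter, PySem.Dict.items_counter,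
    List.map_map]
  have hset : PySem.Set.ofList ((PySem.Chars.lower txt.toList).filter (fun c => c != ' '))
      = (PySem.List.dedup (PySem.Chars.lower txt.toList)).filter (fun c => c != ' ') := by
    rw [← pv_dedup_filter]; simp
  rw [hset]
  apply List.map_congr_left
  intro c hc
  have hp : (c != ' ') = true := (List.mem_filter.mp hc).2
  simp only [Function.comp]
  exact congrArg (fun n : Nat => (String.ofList [c], (n : Int))) (List.count_filter (p := fun ch => ch != ' ') (a := c) hp)

-- ===== VERDICT (by name: the statement is the Claim_ definition above) =====
theorem get_char_count_dict_spec : Claim_equal_get_char_count_dict := by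
  intro txt _
  exact get_char_count_dict_eq txt
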